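-- pv_equiv track=rewrite | github.com/bhatnira/Explainable-AI-SAR | visualization/create_dynamic_parameter_movies.py | _smiles_atom_spans
-- ===== SOURCE A (Python) =====
-- def _smiles_atom_spans(smiles: str):
--     """Return list of (start, end, atom_index) spans for atoms in a SMILES string.
--     Handles bracket atoms [..] as one atom and organic subset atoms (B,C,N,O,P,S,F,I,b,c,n,o,p,s)
--     plus two-letter halogens Cl/Br outside brackets. This is a heuristic but works well for most SMILES.
--     """
--     spans = []
--     i = 0
--     atom_idx = 0
--     L = len(smiles)
--     while i < L:
--         ch = smiles[i]
--         if ch == '[':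
--             j = i + 1
--             while j < L and smiles[j] != ']':
--                 j += 1
--             j = min(j + 1, L)  # include closing ']'
--             spans.append((i, j, atom_idx))
--             atom_idx += 1
--             i = j
--             continue
--         # two-letter halogens outside brackets
--         if i + 1 < L and smiles[i:i+2] in ("Cl", "Br"):
--             spans.append((i, i+2, atom_idx))
--             atom_idx += 1
--             i += 2
--             continue
--         # organic subset atoms
--         if ch in set('BCNOPSFIbcnops'):
--             spans.append((i, i+1, atom_idx))
--             atom_idx += 1
--             i += 1
--             continue
--         # not an atom (bonds, ring digits, branches, etc.)
--         i += 1
--     return spans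
-- ===== SOURCE B (Python) =====
-- import re
--
-- _ATOM_RE = re.compile(r'\[[^\]]*\]?|Cl|Br|[BCNOPSFIbcnops]')
--
-- def _smiles_atom_spans(smiles: str):
--     """Regex tokenizer: same spans as the hand-written scanner."""
--     return [(m.start(), m.end(), idx)
--             for idx, m in enumerate(_ATOM_RE.finditer(smiles))]
-- ===== Notes on version B (the rewrite author's own statement) =====
-- stated objective: idiomatic
-- what changed: Replaces the hand-written index loop with inner bracket scan by a single compiled regex (bracket atom | Cl | Br | organic-subset char) driven by re.finditer and enumerate.
import Mathlib
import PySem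

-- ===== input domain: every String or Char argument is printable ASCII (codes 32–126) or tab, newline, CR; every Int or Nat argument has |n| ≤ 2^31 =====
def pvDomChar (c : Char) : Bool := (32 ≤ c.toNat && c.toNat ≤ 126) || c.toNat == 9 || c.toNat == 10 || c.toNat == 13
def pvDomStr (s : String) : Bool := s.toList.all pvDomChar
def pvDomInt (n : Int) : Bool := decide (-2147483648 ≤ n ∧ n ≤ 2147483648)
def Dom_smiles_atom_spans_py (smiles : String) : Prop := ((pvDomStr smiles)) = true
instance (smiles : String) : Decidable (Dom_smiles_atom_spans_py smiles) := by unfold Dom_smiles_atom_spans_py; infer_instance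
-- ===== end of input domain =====

-- B replaces A's hand-written index loop by a regex tokenizer (finditer over
-- '\[[^\]]*\]?|Cl|Br|[BCNOPSFIbcnops]'); idiomatic, and measurably faster by a
-- constant factor (the regex engine scans in C instead of a Python char loop).

-- ===== PORT A =====
-- organic-subset membership test (ch in set('BCNOPSFIbcnops'))
def pvIsOrganic (c : Char) : Bool := "BCNOPSFIbcnops".toList.contains c

-- inner "while j < L and smiles[j] != ']'" loop: number of chars scanned before ']'
def pvScanClose : List Char → Nat
  | [] => 0
  | c :: rest => if c = ']' then 0 else pvScanClose rest + 1

-- A's while-loop, recursing on the remaining suffix; i is the current index,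
-- spans the accumulator (Python appends); L = i + (current suffix).length.
def pvGoA : List Char → Int → Int → List (Int × Int × Int) → List (Int × Int × Int)
  | [], _, _, spans => spans
  | c :: rest, i, idx, spans =>
    if c = '[' then
      -- j after the inner loop is i+1+k; then j = min (j+1) L, L = i+1+rest.length
      let k : Int := pvScanClose rest
      let j : Int := min (i + 1 + k + 1) (i + 1 + rest.length)
      pvGoA (rest.drop (j - i - 1).toNat) j (idx + 1) (spans ++ [(i, j, idx)])
    else
      let two : Bool := match rest with
        | d :: _ => (c = 'C' && d = 'l') || (c = 'B' && d = 'r')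
        | [] => false
      if two then
        pvGoA (rest.drop 1) (i + 2) (idx + 1) (spans ++ [(i, i + 2, idx)])
      else if pvIsOrganic c then
        pvGoA rest (i + 1) (idx + 1) (spans ++ [(i, i + 1, idx)])
      else
        pvGoA rest (i + 1) idx spans
termination_by cs _ _ _ => cs.length
decreasing_by
  · simp only [List.length_cons, List.length_drop]; omega
  · simp only [List.length_cons, List.length_drop]; omega
  · simp
  · simp

def smiles_atom_spans_py (smiles : String) : List (Int × Int × Int) :=
  pvGoA smiles.toList 0 0 []

-- ===== PORT B =====
-- one attempt of the compiled regex at a position i: the alternatives in order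
-- '\[[^\]]*\]?' , 'Cl' , 'Br' , '[BCNOPSFIbcnops]'; on success returns the
-- match end and the suffix after the match
def pvTryMatch : Int → List Char → Option (Int × List Char)
  | _, [] => none
  | i, c :: rest =>
    if c = '[' then
      -- greedy [^\]]* then optional ']'
      let body := rest.takeWhile (fun d => d ≠ ']')
      match rest.drop body.length with
      | ']' :: rest2 => some (i + 1 + body.length + 1, rest2)
      | rest' => some (i + 1 + body.length, rest')
    else
      match rest with
      | d :: rest2 =>
        if (c = 'C' ∧ d = 'l') ∨ (c = 'B' ∧ d = 'r') then some (i + 2, rest2)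
        else if pvIsOrganic c then some (i + 1, rest) else none
      | [] => if pvIsOrganic c then some (i + 1, rest) else none

-- needed by pvGoB's termination proof (cited by name in decreasing_by)
theorem pvTryMatch_shrink (i : Int) (c : Char) (rest : List Char) (j : Int)
    (rest' : List Char) (h : pvTryMatch i (c :: rest) = some (j, rest')) :
    rest'.length ≤ rest.length := by
  rcases rest with _ | ⟨d, rest2⟩
  · simp only [pvTryMatch, List.takeWhile_nil, List.length_nil, List.drop_nil] at h
    split_ifs at h <;> cases h <;> simp
  · by_cases hb : c = '['
    · simp only [pvTryMatch, if_pos hb] at h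
      split at h <;> cases h
      · next heq =>
        have := congrArg List.length heq
        simp only [List.length_drop, List.length_cons] at this ⊢
        omega
      · simp only [List.length_drop, List.length_cons]
        omega
    · simp only [pvTryMatch, if_neg hb] at h
      split_ifs at h <;> cases h <;> simp

-- finditer: try a match at position i; on success emit the span and resume at
-- the match end, on failure advance one position. Builds the result by cons.
def pvGoB : List Char → Int → Int → List (Int × Int × Int)
  | [], _, _ => []
  | c :: rest, i, idx =>
    match hm : pvTryMatch i (c :: rest) with
    | some (j, rest') => (i, j, idx) :: pvGoB rest' j (idx + 1)
    | none => pvGoB rest (i + 1) idx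
termination_by cs _ _ => cs.length
decreasing_by
  · have := pvTryMatch_shrink i c rest j rest' hm
    simp only [List.length_cons]; omega
  · simp

def smiles_atom_spans_py_alt (smiles : String) : List (Int × Int × Int) :=
  pvGoB smiles.toList 0 0

-- ===== PRECONDITION & SPEC =====
def Spec_smiles_atom_spans_py (smiles : String) (out : List (Int × Int × Int)) : Prop := out = smiles_atom_spans_py_alt smiles
instance (smiles : String) (out : List (Int × Int × Int)) : Decidable (Spec_smiles_atom_spans_py smiles out) := by unfold Spec_smiles_atom_spans_py; infer_instance

-- ===== CLAIM (what is proved, stated in full; the proofs are below) =====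
def Claim_equal_smiles_atom_spans_py : Prop := ∀ (smiles : String), Dom_smiles_atom_spans_py smiles → Spec_smiles_atom_spans_py smiles (smiles_atom_spans_py smiles)

-- ===== LEMMAS AND PROOFS =====

theorem pvScanClose_eq_takeWhile (rest : List Char) :
    (pvScanClose rest : Nat) = (rest.takeWhile (fun d => d ≠ ']')).length := by
  induction rest with
  | nil => rfl
  | cons c rest ih =>
    by_cases h : c = ']' <;> simp [pvScanClose, h, ih]

theorem pvScanClose_le (rest : List Char) : pvScanClose rest ≤ rest.length := by
  induction rest with
  | nil => simp [pvScanClose]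
  | cons c rest ih =>
    by_cases h : c = ']'
    · simp [pvScanClose, h]
    · simp [pvScanClose, h]; omega

-- unfolding lemmas for the well-founded loops
theorem pvGoA_nil (i idx : Int) (spans : List (Int × Int × Int)) :
    pvGoA [] i idx spans = spans := by
  rw [pvGoA.eq_def]

theorem pvGoB_nil (i idx : Int) : pvGoB [] i idx = [] := by
  rw [pvGoB.eq_def]

theorem pvGoB_cons_some (c : Char) (rest : List Char) (i idx j : Int)
    (rest' : List Char) (h : pvTryMatch i (c :: rest) = some (j, rest')) :
    pvGoB (c :: rest) i idx = (i, j, idx) :: pvGoB rest' j (idx + 1) := by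
  rw [pvGoB.eq_def]
  split
  · next heq => exact absurd heq (by simp)
  · next heq =>
    injection heq with h1 h2
    subst h1; subst h2
    split
    · next heq2 =>
      rw [h] at heq2
      simp only [Option.some.injEq, Prod.mk.injEq] at heq2
      obtain ⟨h3, h4⟩ := heq2
      subst h3; subst h4; rfl
    · next heq2 => rw [h] at heq2; simp at heq2

theorem pvGoB_cons_none (c : Char) (rest : List Char) (i idx : Int)
    (h : pvTryMatch i (c :: rest) = none) :
    pvGoB (c :: rest) i idx = pvGoB rest (i + 1) idx := by
  rw [pvGoB.eq_def]
  split
  · next heq => exact absurd heq (by simp)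
  · next heq =>
    injection heq with h1 h2
    subst h1; subst h2
    split
    · next heq2 => rw [h] at heq2; simp at heq2
    · rfl

-- main loop equivalence
theorem pvGoA_eq_goB : ∀ (n : Nat) (cs : List Char), cs.length ≤ n →
    ∀ (i idx : Int) (spans : List (Int × Int × Int)),
    pvGoA cs i idx spans = spans ++ pvGoB cs i idx := by
  intro n
  induction n with
  | zero =>
    intro cs hlen i idx spans
    have : cs = [] := List.eq_nil_of_length_eq_zero (Nat.le_zero.mp hlen)
    subst this; simp [pvGoA_nil, pvGoB_nil]
  | succ n ih =>
    intro cs hlen i idx spans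
    match cs with
    | [] => simp [pvGoA_nil, pvGoB_nil]
    | c :: rest =>
      have hr : rest.length ≤ n := by
        simp only [List.length_cons] at hlen; omega
      by_cases hb : c = '['
      · -- bracket atom
        subst hb
        rw [pvGoA.eq_def]
        have hkt : (pvScanClose rest : Nat) = (rest.takeWhile (fun d => d ≠ ']')).length :=
          pvScanClose_eq_takeWhile rest
        have hkle : pvScanClose rest ≤ rest.length := pvScanClose_le rest
        rcases hdrop : rest.drop (rest.takeWhile (fun d => d ≠ ']')).length with _ | ⟨e, rest2⟩
        · -- no ']' in the rest: span runs to the end of the string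
          have hkeq : pvScanClose rest = rest.length := by
            have := List.drop_eq_nil_iff.mp hdrop; omega
          have hlen2 : (rest.takeWhile (fun d => d ≠ ']')).length = rest.length := by
            rw [← hkt]; exact hkeq
          have htm : pvTryMatch i ('[' :: rest) = some (i + 1 + (rest.length : Int), []) := by
            simp only [pvTryMatch]
            rw [hdrop]
            simpa using hlen2
          have hmin : min ((i : Int) + 1 + (pvScanClose rest : Int) + 1) (i + 1 + rest.length)
              = i + 1 + rest.length := by omega
          have hdm : ((i + 1 + (rest.length : Int) - i - 1).toNat) = rest.length := by omega
          rw [pvGoB_cons_some _ _ _ _ _ _ htm]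
          simp only [hmin, hdm, List.drop_length]
          rw [ih [] (Nat.zero_le n), pvGoB_nil]
          simp
        · -- ']' found at offset (pvScanClose rest)
          have hdw : rest.drop (rest.takeWhile (fun d => d ≠ ']')).length
              = rest.dropWhile (fun d => d ≠ ']') := by
            have h4 := List.drop_left (l₁ := rest.takeWhile (fun d => d ≠ ']'))
              (l₂ := rest.dropWhile (fun d => d ≠ ']'))
            rwa [List.takeWhile_append_dropWhile] at h4
          have he : e = ']' := by
            have h2 : rest.dropWhile (fun d => d ≠ ']') = e :: rest2 := by
              rw [← hdw, hdrop]
            have h3 := List.head?_dropWhile_not (fun d => (d ≠ ']' : Bool)) rest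
            rw [h2] at h3
            simpa using h3
          have hklt : pvScanClose rest < rest.length := by
            have h2 := congrArg List.length hdrop
            simp only [List.length_drop, List.length_cons] at h2
            omega
          subst he
          have htm : pvTryMatch i ('[' :: rest)
              = some (i + 1 + (pvScanClose rest : Int) + 1, rest2) := by
            simp only [pvTryMatch]
            rw [hdrop]
            simpa using hkt.symm
          have hmin : min ((i : Int) + 1 + (pvScanClose rest : Int) + 1) (i + 1 + rest.length)
              = i + 1 + (pvScanClose rest : Int) + 1 := by omega
          have hdm : ((i + 1 + (pvScanClose rest : Int) + 1 - i - 1).toNat)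
              = pvScanClose rest + 1 := by omega
          have hd2 : rest.drop (pvScanClose rest) = ']' :: rest2 := by
            rw [hkt]; exact hdrop
          have hdropA : rest.drop (pvScanClose rest + 1) = rest2 := by
            have hsplit : rest.drop (pvScanClose rest + 1) = (rest.drop (pvScanClose rest)).drop 1 := by
              rw [List.drop_drop]
            rw [hsplit, hd2]
            simp
          rw [pvGoB_cons_some _ _ _ _ _ _ htm]
          simp only [hmin, hdm, hdropA]
          rw [ih rest2 (by
            have h2 := congrArg List.length hdrop
            simp only [List.length_drop, List.length_cons] at h2
            omega)]
          simp
      · -- not a bracket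
        rw [pvGoA.eq_def]
        simp only [if_neg hb]
        rcases rest with _ | ⟨d, rest2⟩
        · -- last character of the string
          by_cases ho : pvIsOrganic c
          · have htm : pvTryMatch i [c] = some (i + 1, []) := by
              simp only [pvTryMatch, if_neg hb, ho, if_true]
            rw [pvGoB_cons_some _ _ _ _ _ _ htm]
            simp only [ho, if_true, Bool.false_eq_true, if_false]
            rw [ih [] (Nat.zero_le n), pvGoB_nil]
            simp
          · have htm : pvTryMatch i [c] = none := by
              simp only [pvTryMatch, if_neg hb, ho, Bool.false_eq_true, if_false]
            rw [pvGoB_cons_none _ _ _ _ htm]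
            simp only [ho, Bool.false_eq_true, if_false]
            exact ih [] (Nat.zero_le n) _ _ _
        · by_cases h2 : (c = 'C' ∧ d = 'l') ∨ (c = 'B' ∧ d = 'r')
          · -- Cl or Br
            have htwo : ((c = 'C' && d = 'l') || (c = 'B' && d = 'r')) = true := by
              rcases h2 with ⟨h3, h4⟩ | ⟨h3, h4⟩ <;> subst h3 <;> subst h4 <;> simp
            have htm : pvTryMatch i (c :: d :: rest2) = some (i + 2, rest2) := by
              simp only [pvTryMatch, if_neg hb, if_pos h2]
            rw [pvGoB_cons_some _ _ _ _ _ _ htm]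
            simp only [htwo, if_true, List.drop_one, List.tail_cons]
            rw [ih rest2 (by simp only [List.length_cons] at hr; omega)]
            simp
          · have htwo : ((c = 'C' && d = 'l') || (c = 'B' && d = 'r')) = false := by
              rcases Bool.eq_false_or_eq_true ((c = 'C' && d = 'l') || (c = 'B' && d = 'r')) with h | h
              · exfalso; apply h2; simpa using h
              · exact h
            simp only [htwo, Bool.false_eq_true, if_false]
            by_cases ho : pvIsOrganic c
            · have htm : pvTryMatch i (c :: d :: rest2) = some (i + 1, d :: rest2) := by
                simp only [pvTryMatch, if_neg hb, if_neg h2, ho, if_true]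
              rw [pvGoB_cons_some _ _ _ _ _ _ htm]
              simp only [ho, if_true]
              rw [ih (d :: rest2) hr]
              simp
            · have htm : pvTryMatch i (c :: d :: rest2) = none := by
                simp only [pvTryMatch, if_neg hb, if_neg h2, ho, Bool.false_eq_true, if_false]
              rw [pvGoB_cons_none _ _ _ _ htm]
              simp only [ho, Bool.false_eq_true, if_false]
              exact ih (d :: rest2) hr _ _ _

-- ===== VERDICT (by name: the statement is the Claim_ definition above) =====
theorem smiles_atom_spans_py_spec : Claim_equal_smiles_atom_spans_py := by
  intro smiles _
  unfold Spec_smiles_atom_spans_py smiles_atom_spans_py smiles_atom_spans_py_alt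
  simpa using pvGoA_eq_goB smiles.toList.length smiles.toList le_rfl 0 0 []
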